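-- pv_equiv track=rewrite | github.com/RFlintstone/INF-Basecamp | Arch 2/BC11H-ChallengeWeek2/Part 4 - 31-40/puzzle-37.py | bcs_encode
-- ===== SOURCE A (Python) =====
-- def bcs_encode(message, key):
--     message = str(message).replace(" ", "")
--
--     key_digits = list(map(int, str(key)))
--     # Start with the encoded message
--     encoded_message = message
--
--     # Repeat the process for each digit in the key
--     for digit in key_digits:
--         # Split the message into groups of size 'digit'
--         groups = [
--             encoded_message[i : i + digit]
--             for i in range(0, len(encoded_message), digit)
--         ]
--
--         # Reverse each group
--         reversed_groups = [group[::-1] for group in groups]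
--
--         # Combine the reversed groups into a single string
--         encoded_message = "".join(reversed_groups)
--
--     return encoded_message
--
-- encoded_message = "TRIEHERTSUOSELCEHAOTHTESNRUIOEABWR"
-- ===== SOURCE B (Python) =====
-- def bcs_encode(message, key):
--     # Instead of rebuilding the string once per key digit, compute each output
--     # character directly: trace the source index of every final position back
--     # through the key digits (in reverse), using only block arithmetic.
--     message = str(message).replace(" ", "")
--     n = len(message)
--     rev_digits = [int(c) for c in str(key)][::-1]
--     out = []
--     for p in range(n):
--         i = p
--         for d in rev_digits:
--             b = (i // d) * d           # start of i's block in that pass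
--             m = min(d, n - b)          # actual block length (last block may be short)
--             i = b + (m - 1 - (i - b))  # position inside the reversed block
--         out.append(message[i])
--     return "".join(out)
-- ===== Notes on version B (the rewrite author's own statement) =====
-- stated objective: alternative
-- what changed: A runs one pass per key digit, each time slicing the whole string into blocks, reversing each block and rejoining; B never rebuilds the string: for each final position it traces the source index back through the key digits in reverse using closed-form block arithmetic (b = (i//d)*d, m = min(d, n-b), i = b + m-1-(i-b)) and reads each character once at the end.
import Mathlib
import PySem

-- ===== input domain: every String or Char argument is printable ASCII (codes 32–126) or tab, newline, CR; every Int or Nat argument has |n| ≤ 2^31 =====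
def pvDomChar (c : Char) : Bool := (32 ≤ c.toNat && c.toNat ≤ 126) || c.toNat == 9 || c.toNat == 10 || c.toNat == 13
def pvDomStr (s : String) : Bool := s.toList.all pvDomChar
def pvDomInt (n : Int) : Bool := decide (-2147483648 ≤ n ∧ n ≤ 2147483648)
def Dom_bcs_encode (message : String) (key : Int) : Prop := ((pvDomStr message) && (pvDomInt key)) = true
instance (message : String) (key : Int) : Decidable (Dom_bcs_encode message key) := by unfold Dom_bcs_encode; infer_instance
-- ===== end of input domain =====

-- B replaces A's per-digit string-rebuilding passes by closed-form index back-tracing: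
-- each output character's source index is computed arithmetically (alternative algorithm, similar cost).

-- ===== PORT A =====
-- A: for each digit, split the string into blocks of that size, reverse each block, rejoin.
-- group[::-1] is list reversal; strings are carried as List Char.
def bcs_encode (message : String) (key : Int) : String :=
  let msg := PySem.Str.replace message " " ""
  -- list(map(int, str(key))): int(c) raising (non-digit char of str(key)) is excluded by Pre_,
  -- so the `.getD 0` default below is never taken inside Pre_.
  let keyDigits : List Int :=
    (PySem.Int.toStr key).toList.map (fun c => (PySem.Int.ofStr? (String.ofList [c])).getD 0)
  let enc := keyDigits.foldl (fun enc digit =>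
      let groups := (PySem.List.pyRange 0 enc.length digit).map
        (fun i => PySem.List.slice enc (some i) (some (i + digit)))
      let reversedGroups := groups.map (fun g => g.reverse)
      reversedGroups.flatten) msg.toList
  String.ofList enc

-- ===== PORT B =====
-- one back-trace step of B's inner loop: b = (i//d)*d; m = min(d, n-b); i = b + (m-1-(i-b))
def intSigma (n i d : Int) : Int :=
  let b := (PySem.Int.floordiv i d) * d
  let m := min d (n - b)
  b + (m - 1 - (i - b))

-- B: for each final position p, trace its source index back through the key digits in
-- reverse; message[i] is ported as getD — the traced i always stays in [0, n) inside Pre_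
-- (proved below), so Python's IndexError is unreachable.
def bcs_encode_alt (message : String) (key : Int) : String :=
  let msg := PySem.Str.replace message " " ""
  let chars := msg.toList
  let n := chars.length
  -- [int(c) for c in str(key)][::-1]  ([::-1] is list reversal)
  let revDigits : List Int :=
    ((PySem.Int.toStr key).toList.map (fun c => (PySem.Int.ofStr? (String.ofList [c])).getD 0)).reverse
  let out := (PySem.List.pyRange 0 (n : Int) 1).map (fun p =>
    chars.getD ((revDigits.foldl (fun i d => intSigma (n : Int) i d) p).toNat) ' ')
  String.ofList out

-- ===== PRECONDITION & SPEC =====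
-- Pre_ excludes exactly the inputs on which A raises: a character of str(key) that int()
-- rejects (the '-' of a negative key, ValueError), or a 0 digit, which makes range(0, n, 0)
-- raise ValueError; i.e. every decimal character of the key must be between '1' and '9'.
def Pre_bcs_encode (message : String) (key : Int) : Prop :=
  ((PySem.Int.toStr key).toList.all (fun c => decide ('1' ≤ c) && decide (c ≤ '9'))) = true
instance (message : String) (key : Int) : Decidable (Pre_bcs_encode message key) := by
  unfold Pre_bcs_encode; infer_instance

def pvWitness_bcs_encode : String × Int := ("AB CD", 21)

def Spec_bcs_encode (message : String) (key : Int) (out : String) : Prop := out = bcs_encode_alt message key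
instance (message : String) (key : Int) (out : String) : Decidable (Spec_bcs_encode message key out) := by unfold Spec_bcs_encode; infer_instance

-- ===== CLAIM (what is proved, stated in full; the proofs are below) =====
def Claim_equal_bcs_encode : Prop := ∀ (message : String) (key : Int), Dom_bcs_encode message key → Pre_bcs_encode message key → Spec_bcs_encode message key (bcs_encode message key)

-- ===== LEMMAS AND PROOFS =====

-- a decimal digit character between '1' and '9' parses by int() to its value, which is ≥ 1
theorem digit_ofStr (c : Char) (h1 : '1' ≤ c) (h9 : c ≤ '9') :
    1 ≤ (PySem.Int.ofStr? (String.ofList [c])).getD 0 := by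
  have hc : c ∈ ['1','2','3','4','5','6','7','8','9'] := by
    have e2 : c.toNat = c.val.toNat := rfl
    have hl : 49 ≤ c.toNat := by
      have h := UInt32.le_iff_toNat_le.mp (Char.le_def.mp h1)
      have e1 : ('1' : Char).val.toNat = 49 := by decide
      omega
    have hr : c.toNat ≤ 57 := by
      have h := UInt32.le_iff_toNat_le.mp (Char.le_def.mp h9)
      have e1 : ('9' : Char).val.toNat = 57 := by decide
      omega
    have hofn : Char.ofNat c.toNat = c := Char.ofNat_toNat c
    interval_cases c.toNat <;> rw [← hofn] <;> decide
  fin_cases hc <;> decide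

-- the closed-form source index of one block-reversal pass, on the Nat side
def natSigma (n d p : Nat) : Nat :=
  p / d * d + (min d (n - p / d * d) - 1 - p % d)

theorem natSigma_lt (n d p : Nat) (hd : 1 ≤ d) (hp : p < n) : natSigma n d p < n := by
  have h1 := Nat.div_add_mod' p d
  have h2 := Nat.mod_lt p (show 0 < d by omega)
  unfold natSigma
  generalize p / d * d = b at h1 ⊢
  omega

-- shifting the trace past a full first block
theorem natSigma_shift (n d t : Nat) (hd : 1 ≤ d) :
    d + natSigma (n - d) d t = natSigma n d (d + t) := by
  unfold natSigma
  rw [Nat.add_div_left t (show 0 < d by omega), Nat.add_mod_left d t]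
  have he : (t / d + 1) * d = t / d * d + d := by ring
  rw [he]
  generalize t / d * d = b
  omega

-- the normal form of one A pass: reverse successive d-blocks, m blocks
def flatRev {α : Type} (d : Nat) : Nat → List α → List α
  | 0, _ => []
  | m + 1, l => (l.take d).reverse ++ flatRev d m (l.drop d)

theorem flatRev_length {α : Type} (d : Nat) :
    ∀ (m : Nat) (l : List α), (flatRev d m l).length = min (d * m) l.length := by
  intro m
  induction m with
  | zero => intro l; simp [flatRev]
  | succ m ih =>
    intro l
    simp only [flatRev, List.length_append, List.length_reverse, List.length_take, ih,
      List.length_drop]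
    have : d * (m + 1) = d * m + d := by ring
    omega

theorem flatRev_getElem? {α : Type} (d : Nat) (hd : 1 ≤ d) :
    ∀ (m : Nat) (l : List α) (p : Nat), p < l.length → p < d * m →
      (flatRev d m l)[p]? = l[natSigma l.length d p]? := by
  intro m
  induction m with
  | zero => intro l p hp hm; omega
  | succ m ih =>
    intro l p hp hm
    by_cases hpd : p < d
    · -- inside the first (reversed) block
      have hlen : ((l.take d).reverse).length = min d l.length := by simp
      have hplt : p < ((l.take d).reverse).length := by omega
      rw [flatRev, List.getElem?_append_left hplt, List.getElem?_reverse (by simpa using hplt)]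
      have hidx : (l.take d).length - 1 - p = min d l.length - 1 - p := by simp
      rw [hidx, List.getElem?_take_of_lt (by omega)]
      congr 1
      have h0 : p / d = 0 := Nat.div_eq_of_lt hpd
      have h1 : p % d = p := Nat.mod_eq_of_lt hpd
      simp [natSigma, h0, h1]
    · -- in the recursive part
      push_neg at hpd
      have hdn' : d ≤ l.length := le_trans hpd (le_of_lt hp)
      have hlen : ((l.take d).reverse).length = d := by simp [Nat.min_eq_left hdn']
      rw [flatRev, List.getElem?_append_right (by rw [hlen]; omega), hlen]
      have hrec := ih (l.drop d) (p - d) (by simp; omega) (by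
        have : d * (m + 1) = d * m + d := by ring
        omega)
      rw [hrec, List.getElem?_drop]
      congr 1
      simp only [List.length_drop]
      obtain ⟨t, rfl⟩ : ∃ t, p = d + t := ⟨p - d, by omega⟩
      simp only [Nat.add_sub_cancel_left]
      exact natSigma_shift l.length d t hd

-- the number of blocks A builds covers the whole list
theorem count_covers (n d : Int) (hd : 0 < d) :
    n ≤ d * ((n - 0 + d - 1) / d) := by
  have hq := Int.ediv_add_emod (n + d - 1) d
  have hr0 : 0 ≤ (n + d - 1) % d := Int.emod_nonneg _ (by omega)
  have hr1 : (n + d - 1) % d < d := Int.emod_lt_of_pos _ hd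
  have : n - 0 + d - 1 = n + d - 1 := by ring
  rw [this]
  nlinarith [hq]

-- A's single pass, in range-free form
theorem rangeFlat {α : Type} (d : Nat) :
    ∀ (m : Nat) (l : List α),
      (List.range m).flatMap (fun k => ((l.drop (d * k)).take d).reverse) = flatRev d m l := by
  intro m
  induction m with
  | zero => intro l; rfl
  | succ m ih =>
    intro l
    rw [List.range_succ_eq_map]
    simp only [List.flatMap_cons, Nat.mul_zero, List.drop_zero, List.flatMap_map]
    have : ∀ k : Nat, ((l.drop (d * (k + 1))).take d).reverse
        = (((l.drop d).drop (d * k)).take d).reverse := by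
      intro k
      rw [List.drop_drop]
      ring_nf
    calc (l.take d).reverse ++ (List.range m).flatMap
            (fun k => ((l.drop (d * (Nat.succ k))).take d).reverse)
        = (l.take d).reverse ++ (List.range m).flatMap
            (fun k => (((l.drop d).drop (d * k)).take d).reverse) := by
          congr 1
          exact List.flatMap_congr (fun k _ => this k)
      _ = (l.take d).reverse ++ flatRev d m (l.drop d) := by rw [ih]
      _ = flatRev d (m + 1) l := rfl

-- A's one pass equals flatRev with enough blocks to cover the list
theorem passA_eq (l : List Char) (d : Int) (hd : 1 ≤ d) :
    ∃ m : Nat, l.length ≤ d.toNat * m ∧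
      (((PySem.List.pyRange 0 (l.length : Int) d).map
        (fun i => PySem.List.slice l (some i) (some (i + d)))).map
          (fun g => g.reverse)).flatten = flatRev d.toNat m l := by
  obtain ⟨dn, rfl⟩ : ∃ dn : Nat, d = (dn : Int) :=
    ⟨d.toNat, (Int.toNat_of_nonneg (by omega)).symm⟩
  have hdn : 1 ≤ dn := by exact_mod_cast hd
  have hd' : (0 : Int) < (dn : Int) := by exact_mod_cast hdn
  rw [PySem.List.pyRange_of_pos 0 (l.length : Int) hd']
  set m : Nat := if (0 : Int) < (l.length : Int)
    then (((l.length : Int) - 0 + (dn : Int) - 1) / (dn : Int)).toNat else 0 with hm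
  refine ⟨m, ?_, ?_⟩
  · rcases Nat.eq_zero_or_pos l.length with h0 | hpos
    · omega
    · have hml : (0 : Int) < (l.length : Int) := by exact_mod_cast hpos
      rw [hm, if_pos hml]
      set q : Int := ((l.length : Int) - 0 + (dn : Int) - 1) / (dn : Int) with hq
      have hc := count_covers (l.length : Int) (dn : Int) hd'
      have hq0 : (0 : Int) ≤ q := by
        rw [hq]; apply Int.ediv_nonneg _ (le_of_lt hd'); omega
      have hle : ((l.length : Nat) : Int) ≤ (((dn * q.toNat : Nat)) : Int) := by
        push_cast [Int.toNat_of_nonneg hq0]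
        rw [← hq] at hc
        linarith
      have htoNat : ((dn : Int)).toNat = dn := by omega
      rw [htoNat]
      exact_mod_cast hle
  · rw [← List.flatMap_def, List.flatMap_map, List.flatMap_map]
    have hA : ∀ k : Nat,
        (PySem.List.slice l (some ((0 : Int) + (dn : Int) * (k : Int)))
          (some ((0 : Int) + (dn : Int) * (k : Int) + (dn : Int)))).reverse
          = ((l.drop (dn * k)).take dn).reverse := by
      intro k
      rw [show (0 : Int) + (dn : Int) * (k : Int) = ((dn * k : Nat) : Int) by push_cast; ring,
        PySem.List.slice_natCast_add]
    rw [List.flatMap_congr (fun k _ => hA k), rangeFlat dn m l]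
    have htoNat : ((dn : Int)).toNat = dn := by omega
    rw [htoNat]

-- one A pass preserves length and reads through natSigma
theorem passA_getD (l : List Char) (d : Int) (hd : 1 ≤ d) :
    ((((PySem.List.pyRange 0 (l.length : Int) d).map
        (fun i => PySem.List.slice l (some i) (some (i + d)))).map
          (fun g => g.reverse)).flatten).length = l.length ∧
    ∀ (p : Nat) (x : Char), p < l.length →
      ((((PySem.List.pyRange 0 (l.length : Int) d).map
        (fun i => PySem.List.slice l (some i) (some (i + d)))).map
          (fun g => g.reverse)).flatten).getD p x = l.getD (natSigma l.length d.toNat p) x := by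
  obtain ⟨m, hcov, heq⟩ := passA_eq l d hd
  have hdn : 1 ≤ d.toNat := by omega
  constructor
  · rw [heq, flatRev_length d.toNat m l]; omega
  · intro p x hp
    rw [heq]
    simp only [List.getD_eq_getElem?_getD]
    rw [flatRev_getElem? d.toNat hdn m l p hp (by omega)]

-- back-traced indices stay in range
theorem trace_lt (n : Nat) (ds : List Int) (hds : ∀ d ∈ ds, 1 ≤ d) (p : Nat) (hp : p < n) :
    ds.foldr (fun d i => natSigma n d.toNat i) p < n := by
  induction ds with
  | nil => exact hp
  | cons d ds ih =>
    simp only [List.foldr_cons]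
    exact natSigma_lt n d.toNat _ (by have := hds d (by simp); omega)
      (ih (fun d' hd' => hds d' (by simp [hd'])))

-- A's whole fold, characterised position by position
theorem fold_getD (ds : List Int) (hds : ∀ d ∈ ds, 1 ≤ d) :
    ∀ (l : List Char),
      (ds.foldl (fun enc digit =>
          (((PySem.List.pyRange 0 (enc.length : Int) digit).map
            (fun i => PySem.List.slice enc (some i) (some (i + digit)))).map
              (fun g => g.reverse)).flatten) l).length = l.length ∧
      ∀ (p : Nat) (x : Char), p < l.length →
        (ds.foldl (fun enc digit =>
          (((PySem.List.pyRange 0 (enc.length : Int) digit).map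
            (fun i => PySem.List.slice enc (some i) (some (i + digit)))).map
              (fun g => g.reverse)).flatten) l).getD p x
          = l.getD (ds.foldr (fun d i => natSigma l.length d.toNat i) p) x := by
  induction ds with
  | nil => intro l; exact ⟨rfl, fun p x _ => rfl⟩
  | cons d ds ih =>
    intro l
    have hd : 1 ≤ d := hds d (by simp)
    obtain ⟨hlen1, hget1⟩ := passA_getD l d hd
    set l' := (((PySem.List.pyRange 0 (l.length : Int) d).map
      (fun i => PySem.List.slice l (some i) (some (i + d)))).map
        (fun g => g.reverse)).flatten with hl'
    obtain ⟨hlen2, hget2⟩ := ih (fun d' hd' => hds d' (by simp [hd'])) l'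
    constructor
    · simp only [List.foldl_cons, ← hl', hlen2, hlen1]
    · intro p x hp
      simp only [List.foldl_cons, ← hl']
      rw [hget2 p x (by omega), hlen1]
      have htr : ds.foldr (fun d i => natSigma l.length d.toNat i) p < l.length :=
        trace_lt l.length ds (fun d' hd' => hds d' (by simp [hd'])) p hp
      rw [hget1 _ x htr]
      simp [List.foldr_cons]

-- B's Int back-trace computes natSigma
theorem intTrace_eq (n : Nat) (ds : List Int) (hds : ∀ d ∈ ds, 1 ≤ d) (p : Nat) (hp : p < n) :
    ds.foldr (fun d i => intSigma (n : Int) i d) ((p : Nat) : Int)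
      = ((ds.foldr (fun d i => natSigma n d.toNat i) p : Nat) : Int) := by
  induction ds with
  | nil => rfl
  | cons d ds ih =>
    have hd : 1 ≤ d := hds d (by simp)
    obtain ⟨dn, rfl⟩ : ∃ dn : Nat, d = (dn : Int) :=
      ⟨d.toNat, (Int.toNat_of_nonneg (by omega)).symm⟩
    have hdn : 1 ≤ dn := by exact_mod_cast hd
    simp only [List.foldr_cons]
    rw [ih (fun d' hd' => hds d' (by simp [hd']))]
    set q : Nat := ds.foldr (fun d i => natSigma n d.toNat i) p with hq
    have hqn : q < n := trace_lt n ds (fun d' hd' => hds d' (by simp [hd'])) p hp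
    simp only [intSigma, natSigma, Int.toNat_natCast]
    rw [PySem.Int.floordiv_natCast q dn]
    rw [← Nat.cast_mul]
    have h1 := Nat.div_add_mod' q dn
    have h2 := Nat.mod_lt q (show 0 < dn by omega)
    generalize q / dn * dn = b at h1 ⊢
    omega

-- ===== VERDICT (by name: the statement is the Claim_ definition above) =====
set_option maxHeartbeats 2000000 in
theorem bcs_encode_spec : Claim_equal_bcs_encode := by
  intro message key _ hpre
  unfold Spec_bcs_encode bcs_encode bcs_encode_alt
  simp only []
  set msg := PySem.Str.replace message " " "" with hmsg
  set chars := msg.toList with hchars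
  set digits : List Int :=
    (PySem.Int.toStr key).toList.map (fun c => (PySem.Int.ofStr? (String.ofList [c])).getD 0)
    with hdigits
  have hds : ∀ d ∈ digits, 1 ≤ d := by
    intro d hd
    rw [hdigits] at hd
    simp only [List.mem_map] at hd
    obtain ⟨c, hc, rfl⟩ := hd
    unfold Pre_bcs_encode at hpre
    rw [List.all_eq_true] at hpre
    have := hpre c hc
    simp only [Bool.and_eq_true, decide_eq_true_eq] at this
    exact digit_ofStr c this.1 this.2
  set n : Nat := chars.length with hn
  congr 1
  -- B's list, rewritten through the Nat-side back-trace
  have hB : ((PySem.List.pyRange 0 (n : Int) 1).map (fun p =>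
        chars.getD ((digits.reverse.foldl (fun i d => intSigma (n : Int) i d) p).toNat) ' '))
      = (List.range n).map (fun p =>
        chars.getD (digits.foldr (fun d i => natSigma n d.toNat i) p) ' ') := by
    rw [PySem.List.pyRange_zero_natCast, List.map_map]
    apply List.map_congr_left
    intro p hp
    simp only [Function.comp, List.foldl_reverse]
    rw [intTrace_eq n digits hds p (List.mem_range.mp hp)]
    simp
  rw [hB]
  obtain ⟨hlen, hget⟩ := fold_getD digits hds chars
  rw [← hn] at hlen hget
  apply List.ext_getElem
  · rw [hlen, List.length_map, List.length_range]
  · intro p h1 h2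
    have h2' : p < n := by simpa using h2
    simp only [List.getElem_map, List.getElem_range]
    rw [← hget p ' ' h2']
    exact (List.getD_eq_getElem _ ' ' h1).symm
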